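-- pv_equiv track=rewrite | github.com/JingYiJun/Inspire-cli | inspire/cli/utils/config.py | _parse_denylist
-- ===== SOURCE A (Python) =====
-- from typing import Any, Optional
--
-- def _parse_denylist(value: Optional[str]) -> list[str]:
--     """Parse denylist from env (comma or newline separated)."""
--
--     if not value:
--         return []
--     parts = []
--     for raw in value.replace("\r", "").split("\n"):
--         for chunk in raw.split(","):
--             item = chunk.strip()
--             if item:
--                 parts.append(item)
--     return parts
-- ===== SOURCE B (Python) =====
-- from typing import Any, Optional
--
-- def _parse_denylist(value: Optional[str]) -> list[str]:
--     """Parse denylist from env (comma or newline separated) in one character scan."""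
--     if not value:
--         return []
--     parts = []
--     buf = []
--     for ch in value:
--         if ch == "\r":
--             continue
--         if ch == "\n" or ch == ",":
--             item = "".join(buf).strip()
--             if item:
--                 parts.append(item)
--             buf = []
--         else:
--             buf.append(ch)
--     item = "".join(buf).strip()
--     if item:
--         parts.append(item)
--     return parts
-- ===== Notes on version B (the rewrite author's own statement) =====
-- stated objective: alternative
-- what changed: Replaced the two-level nested split (delete carriage returns, split into rows at newlines, then split each row at commas) by a single left-to-right character scan that skips carriage returns, flushes the current stripped token at each newline or comma delimiter and collects the non-empty tokens in one pass without building intermediate row/chunk lists.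
import Mathlib
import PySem

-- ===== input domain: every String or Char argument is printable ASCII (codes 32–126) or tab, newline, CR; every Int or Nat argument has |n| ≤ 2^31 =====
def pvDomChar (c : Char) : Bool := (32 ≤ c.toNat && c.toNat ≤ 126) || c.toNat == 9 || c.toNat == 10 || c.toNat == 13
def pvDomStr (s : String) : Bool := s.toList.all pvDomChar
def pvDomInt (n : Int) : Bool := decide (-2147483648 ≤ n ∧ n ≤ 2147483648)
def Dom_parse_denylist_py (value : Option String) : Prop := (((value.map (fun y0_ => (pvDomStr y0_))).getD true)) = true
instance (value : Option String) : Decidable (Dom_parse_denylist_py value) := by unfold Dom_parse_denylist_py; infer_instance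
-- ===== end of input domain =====

-- B replaces A's nested replace/split/split loops by one single-pass character scan (alternative decomposition, same O(n) cost).

-- ===== PORT A =====
def parse_denylist_py (value : Option String) : List String :=
  match value with
  | none => []
  | some v =>
    if v = "" then []
    else
      (PySem.Chars.splitOn (PySem.Chars.replace v.toList ['\r'] []) ['\n']).foldl
        (fun parts raw =>
          (PySem.Chars.splitOn raw [',']).foldl
            (fun parts chunk =>
              let item := PySem.Chars.strip chunk
              if item ≠ [] then parts ++ [String.mk item] else parts)
            parts)
        []

-- ===== PORT B =====
-- one flush of the current buffer: append the stripped token if non-empty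
def pvFlush (parts : List String) (buf : List Char) : List String :=
  let item := PySem.Chars.strip buf
  if item ≠ [] then parts ++ [String.mk item] else parts

-- one step of B's scan: skip '\r', flush on '\n' or ',', otherwise extend the buffer
def pvStep (st : List String × List Char) (ch : Char) : List String × List Char :=
  if ch == '\r' then st
  else if ch == '\n' || ch == ',' then (pvFlush st.1 st.2, [])
  else (st.1, st.2 ++ [ch])

def parse_denylist_py_alt (value : Option String) : List String :=
  match value with
  | none => []
  | some v =>
    if v = "" then []
    else
      let st := v.toList.foldl pvStep ([], [])
      pvFlush st.1 st.2

-- ===== PRECONDITION & SPEC =====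
def Spec_parse_denylist_py (value : Option String) (out : List String) : Prop := out = parse_denylist_py_alt value
instance (value : Option String) (out : List String) : Decidable (Spec_parse_denylist_py value out) := by unfold Spec_parse_denylist_py; infer_instance

-- ===== CLAIM (what is proved, stated in full; the proofs are below) =====
def Claim_equal_parse_denylist_py : Prop := ∀ (value : Option String), Dom_parse_denylist_py value → Spec_parse_denylist_py value (parse_denylist_py value)

-- ===== LEMMAS AND PROOFS =====

-- tokens kept by both programs: strip each piece, drop the empty ones
def pvCollect (l : List (List Char)) : List String :=
  l.filterMap (fun t => if PySem.Chars.strip t ≠ [] then some (String.mk (PySem.Chars.strip t)) else none)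

-- replace.go with old = ['\r'], new = [] is a filter
theorem pv_replace_go_cr (l : List Char) (fuel : Nat) (acc : List Char)
    (h : l.length ≤ fuel) :
    PySem.Chars.replace.go ['\r'] [] fuel l acc = acc.reverse ++ l.filter (· ≠ '\r') := by
  induction l generalizing fuel acc with
  | nil =>
      cases fuel <;> rw [PySem.Chars.replace.go.eq_def] <;> simp
  | cons c rest ih =>
      cases fuel with
      | zero => simp at h
      | succ f =>
        rw [PySem.Chars.replace.go.eq_def]
        simp only [List.isPrefixOf, List.filter_cons]
        by_cases hc : c = '\r'
        · subst hc
          rw [List.length_cons] at h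
          rw [if_pos (show (('\r' : Char) == '\r' && true) = true by simp)]
          simp only [List.length_singleton, List.drop_one, List.tail_cons, List.reverse_nil,
            List.nil_append]
          rw [ih f acc (Nat.le_of_succ_le_succ h)]
          simp
        · have : ('\r' == c) = false := by simp [hc, BEq.comm]
          simp only [this, Bool.false_and, if_neg Bool.false_ne_true]
          rw [ih f (c :: acc) (by simpa using Nat.le_of_succ_le_succ h)]
          simp [hc]

theorem pv_replace_cr (cs : List Char) :
    PySem.Chars.replace cs ['\r'] [] = cs.filter (· ≠ '\r') := by
  rw [PySem.Chars.replace, if_neg (by simp : ¬(['\r'] : List Char).isEmpty = true)]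
  simpa using pv_replace_go_cr cs cs.length [] le_rfl

-- splitOn.go with a single-character separator is List.splitOnP
theorem pv_splitOn_go_single (d : Char) (l : List Char) (fuel : Nat)
    (cur : List Char) (acc : List (List Char)) (h : l.length ≤ fuel) :
    PySem.Chars.splitOn.go [d] fuel l cur acc
      = acc.reverse ++ List.modifyHead (cur.reverse ++ ·) (List.splitOnP (· == d) l) := by
  induction l generalizing fuel cur acc with
  | nil =>
      cases fuel <;> rw [PySem.Chars.splitOn.go.eq_def] <;> simp
  | cons c rest ih =>
      cases fuel with
      | zero => simp at h
      | succ f =>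
        rw [PySem.Chars.splitOn.go.eq_def]
        simp only [List.isPrefixOf, List.splitOnP_cons]
        by_cases hc : c = d
        · subst hc
          simp only [beq_self_eq_true, Bool.and_true, if_pos, List.length_cons,
            List.length_nil, Nat.zero_add, List.drop_succ_cons, List.drop_zero]
          rw [List.length_cons] at h
          rw [ih f [] (cur.reverse :: acc) (Nat.le_of_succ_le_succ h)]
          obtain ⟨hd, tl, heq⟩ :=
            List.exists_cons_of_ne_nil (List.splitOnP_ne_nil (fun x => x == c) rest)
          simp [heq]
        · have hbc : (c == d) = false := by simp [hc]
          have hdc : (d == c) = false := by simpa using Ne.symm hc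
          simp only [hdc, Bool.false_and, if_neg Bool.false_ne_true, hbc,
            if_neg Bool.false_ne_true]
          rw [List.length_cons] at h
          rw [ih f (c :: cur) acc (Nat.le_of_succ_le_succ h)]
          obtain ⟨hd, tl, heq⟩ := List.exists_cons_of_ne_nil (List.splitOnP_ne_nil (· == d) rest)
          simp [heq]

theorem pv_splitOn_single (d : Char) (l : List Char) :
    PySem.Chars.splitOn l [d] = List.splitOnP (· == d) l := by
  rw [PySem.Chars.splitOn, pv_splitOn_go_single d l (l.length + 1) [] [] (Nat.le_succ _)]
  obtain ⟨hd, tl, heq⟩ := List.exists_cons_of_ne_nil (List.splitOnP_ne_nil (· == d) l)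
  simp [heq]

-- splitting each p-piece again on q is one split on (p || q)
theorem pv_splitOnP_flatMap (p q : Char → Bool) (l : List Char) :
    (List.splitOnP p l).flatMap (List.splitOnP q)
      = List.splitOnP (fun c => p c || q c) l := by
  induction l with
  | nil => simp
  | cons c rest ih =>
      simp only [List.splitOnP_cons]
      by_cases hp : p c
      · simp [hp, List.flatMap_cons, ← ih]
      · obtain ⟨hd, tl, heq⟩ := List.exists_cons_of_ne_nil (List.splitOnP_ne_nil p rest)
        by_cases hq : q c
        · simp only [hp, hq, Bool.false_or, if_neg Bool.false_ne_true, if_pos]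
          rw [heq]
          simp only [List.modifyHead_cons, List.flatMap_cons, List.splitOnP_cons, hq, if_pos]
          rw [← ih, heq]
          simp
        · simp only [hp, hq, Bool.false_or, if_neg Bool.false_ne_true]
          rw [heq]
          simp only [List.modifyHead_cons, List.flatMap_cons, List.splitOnP_cons, hq,
            if_neg Bool.false_ne_true]
          obtain ⟨hd2, tl2, heq2⟩ := List.exists_cons_of_ne_nil (List.splitOnP_ne_nil q hd)
          rw [← ih, heq]
          simp [heq2]

-- a prefix free of the predicate followed by one delimiter splits off as one piece
theorem pv_splitOnP_sep (p : Char → Bool) (xs : List Char) (c : Char) (ys : List Char)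
    (hxs : ∀ x ∈ xs, p x = false) (hc : p c = true) :
    List.splitOnP p (xs ++ c :: ys) = xs :: List.splitOnP p ys := by
  induction xs with
  | nil => simp [List.splitOnP_cons, hc]
  | cons x xs' ih =>
      have hx : p x = false := hxs x (List.mem_cons_self)
      rw [List.cons_append, List.splitOnP_cons, if_neg (by simp [hx]),
        ih (fun a ha => hxs a (List.mem_cons_of_mem _ ha))]
      simp

-- A's inner comma loop collects the stripped non-empty chunks
theorem pv_inner (chunks : List (List Char)) (parts : List String) :
    chunks.foldl
        (fun parts chunk =>
          let item := PySem.Chars.strip chunk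
          if item ≠ [] then parts ++ [String.mk item] else parts)
        parts
      = parts ++ pvCollect chunks := by
  induction chunks generalizing parts with
  | nil => simp [pvCollect]
  | cons ch rest ih =>
      simp only [List.foldl_cons, pvCollect, List.filterMap_cons]
      split_ifs with h
      · rw [ih]; simp [pvCollect, h]
      · rw [ih]; simp [pvCollect, h]

-- A's outer loop over rows is a collect over the flattened comma split
theorem pv_outer (rows : List (List Char)) (parts : List String) :
    rows.foldl
        (fun parts raw =>
          (PySem.Chars.splitOn raw [',']).foldl
            (fun parts chunk =>
              let item := PySem.Chars.strip chunk
              if item ≠ [] then parts ++ [String.mk item] else parts)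
            parts)
        parts
      = parts ++ pvCollect (rows.flatMap (List.splitOnP (· == ','))) := by
  induction rows generalizing parts with
  | nil => simp [pvCollect]
  | cons r rest ih =>
      simp only [List.foldl_cons, List.flatMap_cons]
      rw [pv_splitOn_single, pv_inner, ih]
      simp [pvCollect, List.filterMap_append]

-- B's scan over cs, started with a delimiter-free buffer, collects the same tokens
theorem pv_scan (cs : List Char) (parts : List String) (buf : List Char)
    (hbuf : ∀ c ∈ buf, (c == '\n' || c == ',') = false ∧ c ≠ '\r') :
    pvFlush (cs.foldl pvStep (parts, buf)).1 (cs.foldl pvStep (parts, buf)).2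
      = parts ++ pvCollect (List.splitOnP (fun c => c == '\n' || c == ',')
          (buf ++ cs.filter (· ≠ '\r'))) := by
  induction cs generalizing parts buf with
  | nil =>
      rw [List.filter_nil, List.append_nil, List.foldl_nil,
        List.splitOnP_eq_single _ _ (by simpa using fun c hc => (hbuf c hc).1)]
      simp only [pvCollect, List.filterMap_cons, List.filterMap_nil, pvFlush]
      split_ifs with h <;> simp
  | cons c cs' ih =>
      simp only [List.foldl_cons, List.filter_cons]
      by_cases hr : c = '\r'
      · subst hr
        simp only [pvStep, beq_self_eq_true, if_pos, decide_eq_true_eq, ne_eq,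
          not_true_eq_false, decide_false, if_neg Bool.false_ne_true]
        exact ih parts buf hbuf
      · have hrb : (c == '\r') = false := by simp [hr]
        by_cases hd : (c == '\n' || c == ',') = true
        · have hceq : pvStep (parts, buf) c = (pvFlush parts buf, []) := by
            simp [pvStep, hrb, hd]
          have hcr : decide (c ≠ '\r') = true := by simp [hr]
          rw [hceq, ih (pvFlush parts buf) [] (by simp), if_pos hcr,
            pv_splitOnP_sep _ buf c _ (fun x hx => (hbuf x hx).1) hd]
          simp only [pvCollect, List.filterMap_cons, pvFlush]
          split_ifs with h <;> simp [pvCollect, hr]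
        · have hceq : pvStep (parts, buf) c = (parts, buf ++ [c]) := by
            simp [pvStep, hrb, hd]
          rw [hceq, ih parts (buf ++ [c])
            (by intro x hx
                rcases List.mem_append.1 hx with h1 | h1
                · exact hbuf x h1
                · simp only [List.mem_singleton] at h1; subst h1
                  exact ⟨by simpa using hd, hr⟩)]
          simp [hr]

-- ===== VERDICT (by name: the statement is the Claim_ definition above) =====
theorem parse_denylist_py_spec : Claim_equal_parse_denylist_py := by
  intro value _
  unfold Spec_parse_denylist_py parse_denylist_py parse_denylist_py_alt
  match value with
  | none => rfl
  | some v =>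
    by_cases hv : v = ""
    · simp [hv]
    · simp only [if_neg hv]
      rw [pv_replace_cr, pv_splitOn_single, pv_outer, pv_splitOnP_flatMap,
        pv_scan v.toList [] [] (by simp)]
      simp
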